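-- pv_equiv track=rewrite | github.com/andresmend12-lab/MiFantasy | sniff_market_json_v3_debug.py | split_camel_chunk
-- ===== SOURCE A (Python) =====
-- def _is_lower_letter(ch: str) -> bool:
--     return ch.isalpha() and ch == ch.lower()
--
-- def _is_upper_letter(ch: str) -> bool:
--     return ch.isalpha() and ch == ch.upper()
--
-- def split_camel_chunk(chunk: str) -> list[str]:
--     if not chunk:
--         return []
--     result: list[str] = []
--     current = ""
--     for idx, char in enumerate(chunk):
--         if idx > 0 and _is_upper_letter(char) and _is_lower_letter(chunk[idx - 1]) and len(current) >= 3: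
--             result.append(current)
--             current = char
--         else:
--             current += char
--     if current:
--         result.append(current)
--     return result
-- ===== SOURCE B (Python) =====
-- def _is_lower_letter(ch: str) -> bool:
--     return ch.isalpha() and ch == ch.lower()
--
-- def _is_upper_letter(ch: str) -> bool:
--     return ch.isalpha() and ch == ch.upper()
--
-- def split_camel_chunk(chunk: str) -> list[str]:
--     # Two-phase: collect boundary indices, then slice between consecutive bounds.
--     if not chunk:
--         return []
--     bounds = [0]
--     start = 0
--     for idx in range(1, len(chunk)):
--         if _is_upper_letter(chunk[idx]) and _is_lower_letter(chunk[idx - 1]) and idx - start >= 3: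
--             bounds.append(idx)
--             start = idx
--     bounds.append(len(chunk))
--     return [chunk[i:j] for i, j in zip(bounds, bounds[1:])]
-- ===== Notes on version B (the rewrite author's own statement) =====
-- stated objective: alternative
-- what changed: B replaces A's single pass accumulating a growing current-string with a two-phase algorithm: one index loop collecting boundary positions, then a separate slicing pass over consecutive boundary pairs.
import Mathlib
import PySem

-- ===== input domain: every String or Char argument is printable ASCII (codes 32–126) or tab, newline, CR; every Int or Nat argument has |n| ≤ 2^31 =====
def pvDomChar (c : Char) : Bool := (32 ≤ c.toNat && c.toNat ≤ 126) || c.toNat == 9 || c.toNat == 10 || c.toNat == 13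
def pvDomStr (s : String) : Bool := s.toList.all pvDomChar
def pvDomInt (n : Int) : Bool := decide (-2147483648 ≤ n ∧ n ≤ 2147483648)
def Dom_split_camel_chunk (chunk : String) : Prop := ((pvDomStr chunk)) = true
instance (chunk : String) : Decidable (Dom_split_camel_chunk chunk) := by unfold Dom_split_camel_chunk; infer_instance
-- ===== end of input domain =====

-- B splits the same camelCase boundaries by first collecting boundary indices and then
-- slicing the string between consecutive bounds (alternative decomposition, same cost).

-- ===== PORT A =====
-- ch.isalpha() and ch == ch.lower()
def pvIsLowerLetter (c : Char) : Bool := PySem.Chars.isalpha c && (c == PySem.Chars.lowerChar c)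
-- ch.isalpha() and ch == ch.upper()
def pvIsUpperLetter (c : Char) : Bool := PySem.Chars.isalpha c && (c == PySem.Chars.upperChar c)

-- A's for-loop over enumerate(chunk) with state (result, current); tail = chars not yet seen.
def pvALoop (orig : List Char) : List Char → Nat → List (List Char) → List Char → List (List Char)
  | [], _, res, cur => if cur = [] then res else res ++ [cur]
  | c :: rest, idx, res, cur =>
      if decide (idx > 0) && pvIsUpperLetter c
          && (match PySem.List.pyGet? orig ((idx : Int) - 1) with
              | some p => pvIsLowerLetter p
              | none => false)
          && decide (cur.length ≥ 3)
      then pvALoop orig rest (idx + 1) (res ++ [cur]) [c]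
      else pvALoop orig rest (idx + 1) res (cur ++ [c])

def split_camel_chunk (chunk : String) : List String :=
  let cs := chunk.toList
  if cs = [] then []
  else (pvALoop cs cs 0 [] []).map String.mk

-- ===== PORT B =====
-- B's boundary test at index idx with current segment start `start`.
def pvBCond (orig : List Char) (idx start : Nat) : Bool :=
  (match PySem.List.pyGet? orig (idx : Int) with
   | some c => pvIsUpperLetter c
   | none => false)
  && (match PySem.List.pyGet? orig ((idx : Int) - 1) with
      | some p => pvIsLowerLetter p
      | none => false)
  && decide ((idx : Int) - (start : Int) ≥ 3)

-- B's first pass: for idx in range(1, len(chunk)), accumulate boundary indices.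
def pvBLoop (orig : List Char) (n : Nat) (idx start : Nat) (bnds : List Nat) : List Nat :=
  if idx < n then
    if pvBCond orig idx start then pvBLoop orig n (idx + 1) idx (bnds ++ [idx])
    else pvBLoop orig n (idx + 1) start bnds
  else bnds
termination_by n - idx

def split_camel_chunk_alt (chunk : String) : List String :=
  let cs := chunk.toList
  if cs = [] then []
  else
    let n := cs.length
    let bounds := pvBLoop cs n 1 0 [0] ++ [n]
    (bounds.zip bounds.tail).map
      (fun p => String.mk (PySem.List.slice cs (some (p.1 : Int)) (some (p.2 : Int))))

-- ===== PRECONDITION & SPEC =====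
def Spec_split_camel_chunk (chunk : String) (out : List String) : Prop := out = split_camel_chunk_alt chunk
instance (chunk : String) (out : List String) : Decidable (Spec_split_camel_chunk chunk out) := by unfold Spec_split_camel_chunk; infer_instance

-- ===== CLAIM (what is proved, stated in full; the proofs are below) =====
def Claim_equal_split_camel_chunk : Prop := ∀ (chunk : String), Dom_split_camel_chunk chunk → Spec_split_camel_chunk chunk (split_camel_chunk chunk)

-- ===== LEMMAS AND PROOFS =====

-- the common boundary condition, in Nat form
def pvCond (cs : List Char) (idx start : Nat) : Bool :=
  (cs[idx]?.elim false pvIsUpperLetter) && ((cs[idx - 1]?).elim false pvIsLowerLetter)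
    && decide (start + 3 ≤ idx)

-- the segment cs[a:b]
def pvSeg (cs : List Char) (a b : Nat) : List Char := (cs.drop a).take (b - a)

-- abstract result: segments produced from state (start, idx), scanning idx upward to n
def pvG (cs : List Char) (n start idx : Nat) : List (List Char) :=
  if idx < n then
    if pvCond cs idx start then pvSeg cs start idx :: pvG cs n idx (idx + 1)
    else pvG cs n start (idx + 1)
  else [pvSeg cs start idx]
termination_by n - idx

-- accumulator-free form of B's first pass
def pvBTail (cs : List Char) (n idx start : Nat) : List Nat :=
  if idx < n then
    if pvCond cs idx start then idx :: pvBTail cs n (idx + 1) idx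
    else pvBTail cs n (idx + 1) start
  else []
termination_by n - idx

-- map over consecutive pairs
def pvPairsMap {α : Type} (f : Nat → Nat → α) : List Nat → List α
  | a :: b :: r => f a b :: pvPairsMap f (b :: r)
  | _ => []

theorem pvSeg_length (cs : List Char) (a b : Nat) (hb : b ≤ cs.length) :
    (pvSeg cs a b).length = b - a := by
  simp [pvSeg]; omega

theorem pvSeg_snoc (cs : List Char) (a b : Nat) (c : Char) (ha : a ≤ b)
    (hc : cs[b]? = some c) : pvSeg cs a b ++ [c] = pvSeg cs a (b + 1) := by
  have hb : b < cs.length := by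
    by_contra h
    simp [List.getElem?_eq_none (by omega : cs.length ≤ b)] at hc
  have h1 : b + 1 - a = (b - a) + 1 := by omega
  simp only [pvSeg, h1, List.take_succ]
  have : (cs.drop a)[b - a]? = some c := by
    rw [List.getElem?_drop]
    have : a + (b - a) = b := by omega
    rw [this, hc]
  simp [this]

theorem pvSeg_singleton (cs : List Char) (b : Nat) (c : Char) (hc : cs[b]? = some c) :
    pvSeg cs b (b + 1) = [c] := by
  have h := pvSeg_snoc cs b b c (le_refl b) hc
  simpa [pvSeg] using h.symm

theorem pvCond_eq_bCond (cs : List Char) (idx start : Nat) (h1 : 1 ≤ idx) :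
    pvBCond cs idx start = pvCond cs idx start := by
  have e1 : ((idx : Int) - 1) = ((idx - 1 : Nat) : Int) := by omega
  have e2 : (decide ((idx : Int) - (start : Int) ≥ 3)) = decide (start + 3 ≤ idx) := by
    simp; omega
  simp only [pvBCond, pvCond, e1, e2, PySem.List.pyGet?_natCast]
  cases cs[idx]? <;> cases cs[idx - 1]? <;> rfl

-- A's loop computes pvG
theorem pvALoop_eq_g (cs : List Char) :
    ∀ (rest : List Char) (idx start : Nat) (res : List (List Char)),
      rest = cs.drop idx → start < idx → idx ≤ cs.length →
      pvALoop cs rest idx res (pvSeg cs start idx)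
        = res ++ pvG cs cs.length start idx := by
  intro rest
  induction rest with
  | nil =>
    intro idx start res hr hs hn
    have hlen : cs.length ≤ idx := by
      by_contra h
      have : cs.drop idx ≠ [] := by
        simp [List.drop_eq_nil_iff]; omega
      exact this hr.symm
    have hidx : idx = cs.length := by omega
    have hne : pvSeg cs start idx ≠ [] := by
      have := pvSeg_length cs start idx (by omega)
      intro h; rw [h] at this; simp at this; omega
    rw [pvALoop, if_neg hne, pvG, if_neg (by omega)]
  | cons c rest' ih =>
    intro idx start res hr hs hn
    have hidx : idx < cs.length := by
      by_contra h
      rw [List.drop_eq_nil_iff.mpr (by omega)] at hr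
      exact List.cons_ne_nil _ _ hr
    have hc : cs[idx]? = some c := by
      have := congrArg (fun l => l[0]?) hr
      simpa [List.getElem?_drop] using this.symm
    have hr' : rest' = cs.drop (idx + 1) := by
      have := congrArg List.tail hr
      simpa [List.tail_drop] using this
    have hlen : (pvSeg cs start idx).length = idx - start :=
      pvSeg_length cs start idx (by omega)
    have hprev : (match PySem.List.pyGet? cs ((idx : Int) - 1) with
        | some p => pvIsLowerLetter p | none => false)
        = (cs[idx - 1]?).elim false pvIsLowerLetter := by
      have e1 : ((idx : Int) - 1) = ((idx - 1 : Nat) : Int) := by omega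
      rw [e1, PySem.List.pyGet?_natCast]
      cases cs[idx - 1]? <;> rfl
    have hcondA : (decide (idx > 0) && pvIsUpperLetter c
          && (match PySem.List.pyGet? cs ((idx : Int) - 1) with
              | some p => pvIsLowerLetter p | none => false)
          && decide ((pvSeg cs start idx).length ≥ 3))
        = pvCond cs idx start := by
      rw [hprev, hlen]
      simp only [pvCond, hc, Option.elim]
      have : decide (idx > 0) = true := by simp; omega
      rw [this]
      have : decide (idx - start ≥ 3) = decide (start + 3 ≤ idx) := by simp; omega
      rw [this]
      cases pvIsUpperLetter c <;> cases (cs[idx - 1]?).elim false pvIsLowerLetter <;> simp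
    rw [pvALoop, hcondA]
    by_cases hcond : pvCond cs idx start = true
    · rw [if_pos hcond]
      have h1 : [c] = pvSeg cs idx (idx + 1) := (pvSeg_singleton cs idx c hc).symm
      rw [h1, ih (idx + 1) idx (res ++ [pvSeg cs start idx]) hr' (by omega) (by omega)]
      conv_rhs => rw [pvG, if_pos hidx, if_pos hcond]
      simp
    · rw [if_neg (by simp [hcond])]
      rw [pvSeg_snoc cs start idx c (by omega) hc,
        ih (idx + 1) start res hr' (by omega) (by omega)]
      conv_rhs => rw [pvG, if_pos hidx, if_neg hcond]

-- B's loop is its accumulator-free form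
theorem pvBLoop_eq (cs : List Char) (n : Nat) :
    ∀ (idx start : Nat) (bnds : List Nat), 1 ≤ idx →
      pvBLoop cs n idx start bnds = bnds ++ pvBTail cs n idx start := by
  intro idx
  induction hfuel : n - idx using Nat.strong_induction_on generalizing idx with
  | _ fuel ih =>
    intro start bnds h1
    rw [pvBLoop, pvBTail]
    by_cases hlt : idx < n
    · rw [if_pos hlt, if_pos hlt, pvCond_eq_bCond cs idx start h1]
      by_cases hcond : pvCond cs idx start = true
      · rw [if_pos hcond, if_pos hcond,
          ih (n - (idx + 1)) (by omega) (idx + 1) rfl idx (bnds ++ [idx]) (by omega)]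
        simp
      · rw [if_neg hcond, if_neg hcond,
          ih (n - (idx + 1)) (by omega) (idx + 1) rfl start bnds (by omega)]
    · rw [if_neg hlt, if_neg hlt]
      simp

-- the pairs map of the boundary list computes pvG
theorem pvPairsMap_bounds (cs : List Char) (n : Nat) :
    ∀ (idx start : Nat), idx ≤ n →
      pvPairsMap (pvSeg cs) (start :: (pvBTail cs n idx start ++ [n]))
        = pvG cs n start idx := by
  intro idx
  induction hfuel : n - idx using Nat.strong_induction_on generalizing idx with
  | _ fuel ih =>
    intro start hn
    rw [pvBTail, pvG]
    by_cases hlt : idx < n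
    · rw [if_pos hlt, if_pos hlt]
      by_cases hcond : pvCond cs idx start = true
      · rw [if_pos hcond, if_pos hcond]
        have := ih (n - (idx + 1)) (by omega) (idx + 1) rfl idx (by omega)
        simpa [pvPairsMap] using congrArg (pvSeg cs start idx :: ·) this
      · rw [if_neg hcond, if_neg hcond]
        exact ih (n - (idx + 1)) (by omega) (idx + 1) rfl start (by omega)
    · rw [if_neg hlt, if_neg hlt]
      have : idx = n := by omega
      subst this
      rfl

theorem pvZip_tail_pairsMap {α : Type} (f : Nat × Nat → α) :
    ∀ (l : List Nat), (l.zip l.tail).map f = pvPairsMap (fun a b => f (a, b)) l := by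
  intro l
  induction l with
  | nil => rfl
  | cons a l ih =>
    cases l with
    | nil => rfl
    | cons b r =>
      simp only [List.tail_cons, List.zip_cons_cons, List.map_cons, pvPairsMap]
      exact congrArg _ ih

theorem pvPairsMap_map {α β : Type} (f : Nat → Nat → α) (g : α → β) :
    ∀ (l : List Nat), (pvPairsMap f l).map g = pvPairsMap (fun a b => g (f a b)) l := by
  intro l
  induction l with
  | nil => rfl
  | cons a l ih =>
    cases l with
    | nil => rfl
    | cons b r => simpa [pvPairsMap] using ih

theorem pvSlice_eq_seg (cs : List Char) (a b : Nat) :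
    PySem.List.slice cs (some (a : Int)) (some (b : Int)) = pvSeg cs a b := by
  rw [PySem.List.slice_toNat cs (by omega) (by omega)]
  simp [pvSeg]

-- ===== VERDICT (by name: the statement is the Claim_ definition above) =====
theorem split_camel_chunk_spec : Claim_equal_split_camel_chunk := by
  intro chunk _
  unfold Spec_split_camel_chunk split_camel_chunk split_camel_chunk_alt
  by_cases hnil : chunk.toList = []
  · simp [hnil]
  · simp only [hnil]
    obtain ⟨c, rest, hcr⟩ := List.exists_cons_of_ne_nil hnil
    set cs := chunk.toList with hcs
    have hn : 1 ≤ cs.length := by rw [hcr]; simp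
    -- left side: A's loop
    have hA0 : pvALoop cs cs 0 [] [] = pvALoop cs rest 1 [] [c] := by
      rw [hcr]
      rw [pvALoop]
      simp
    have hc0 : cs[0]? = some c := by rw [hcr]; rfl
    have hAg : pvALoop cs cs 0 [] [] = pvG cs cs.length 0 1 := by
      rw [hA0, ← pvSeg_singleton cs 0 c hc0]
      have hrest : rest = cs.drop 1 := by rw [hcr]; simp
      simpa using pvALoop_eq_g cs rest 1 0 [] hrest (by omega) hn
    -- right side: B's two phases
    have hB : pvBLoop cs cs.length 1 0 [0] ++ [cs.length]
        = 0 :: (pvBTail cs cs.length 1 0 ++ [cs.length]) := by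
      rw [pvBLoop_eq cs cs.length 1 0 [0] (le_refl 1)]
      simp
    rw [hAg, hB,
      pvZip_tail_pairsMap
        (fun p => String.mk (PySem.List.slice cs (some (p.1 : Int)) (some (p.2 : Int))))]
    have : (fun (a b : Nat) =>
        String.mk (PySem.List.slice cs (some (a : Int)) (some (b : Int))))
        = fun a b => String.mk (pvSeg cs a b) := by
      funext a b; rw [pvSlice_eq_seg]
    rw [this, ← pvPairsMap_map (pvSeg cs) String.mk,
      pvPairsMap_bounds cs cs.length 1 0 hn]
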